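-- pv_equiv track=rewrite | github.com/ravardh/GIETU_SuperCoderBatch2 | Tresurehunt.py | find_max_locations
-- ===== SOURCE A (Python) =====
-- def find_max_locations(locations, compass_range):
--     n = len(locations)
--     max_locations = 0
--     current_range = 0
--
--     for i in range(n):
--         if i <= current_range:
--             current_range = max(current_range, i + compass_range)
--             max_locations = i + 1
--         else:
--             break
--     return max_locations
-- ===== SOURCE B (Python) =====
-- def find_max_locations(locations, compass_range):
--     # Closed form: location 0 is always reached; with range >= 1 each step
--     # extends reach by at least one, so all n are reached; otherwise only 1.
--     n = len(locations)
--     if n == 0: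
--         return 0
--     return n if compass_range >= 1 else 1
-- ===== Notes on version B (the rewrite author's own statement) =====
-- stated objective: faster
-- what changed: Replaced the greedy reach-extension loop with an O(1) closed form: 0 for an empty list, n when compass_range >= 1 (reach grows past every index), else 1 (only index 0 is reachable).
import Mathlib
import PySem

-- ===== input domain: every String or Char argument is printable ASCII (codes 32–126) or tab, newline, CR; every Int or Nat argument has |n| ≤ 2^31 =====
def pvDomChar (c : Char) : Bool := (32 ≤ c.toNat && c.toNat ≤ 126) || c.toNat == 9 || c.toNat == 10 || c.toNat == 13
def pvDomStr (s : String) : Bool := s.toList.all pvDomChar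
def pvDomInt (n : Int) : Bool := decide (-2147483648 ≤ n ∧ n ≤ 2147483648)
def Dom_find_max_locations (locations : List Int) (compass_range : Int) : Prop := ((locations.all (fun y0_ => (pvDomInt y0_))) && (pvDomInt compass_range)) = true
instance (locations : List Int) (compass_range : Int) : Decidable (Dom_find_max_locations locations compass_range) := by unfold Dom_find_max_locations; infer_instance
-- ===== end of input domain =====

-- ===== PORT A =====
-- loop of A: iterate i over range(n), break when i > current_range
def findLoopA (compass_range : Int) : List Nat → Int → Int → Int
  | [], _, max_locations => max_locations
  | i :: rest, current_range, max_locations =>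
    if (i : Int) ≤ current_range then
      findLoopA compass_range rest (max current_range ((i : Int) + compass_range)) ((i : Int) + 1)
    else
      max_locations

def find_max_locations (locations : List Int) (compass_range : Int) : Int :=
  findLoopA compass_range (List.range locations.length) 0 0

-- ===== PORT B =====
def find_max_locations_alt (locations : List Int) (compass_range : Int) : Int :=
  if locations.length = 0 then 0
  else if 1 ≤ compass_range then (locations.length : Int) else 1

-- ===== PRECONDITION & SPEC =====
def Spec_find_max_locations (locations : List Int) (compass_range : Int) (out : Int) : Prop := out = find_max_locations_alt locations compass_range
instance (locations : List Int) (compass_range : Int) (out : Int) : Decidable (Spec_find_max_locations locations compass_range out) := by unfold Spec_find_max_locations; infer_instance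

-- ===== CLAIM (what is proved, stated in full; the proofs are below) =====
def Claim_equal_find_max_locations : Prop := ∀ (locations : List Int) (compass_range : Int), Dom_find_max_locations locations compass_range → Spec_find_max_locations locations compass_range (find_max_locations locations compass_range)

-- ===== LEMMAS AND PROOFS =====

lemma findLoopA_ge_one (cr : Int) (hcr : 1 ≤ cr) (k i : Nat) :
    ∀ cur m : Int, (i : Int) ≤ cur → findLoopA cr (List.range' i k) cur m = (if k = 0 then m else ((i + k : Nat) : Int)) := by
  induction k generalizing i with
  | zero => intro cur m _; simp [findLoopA]
  | succ k ih =>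
    intro cur m h
    rw [List.range'_succ]
    simp only [findLoopA, if_pos h]
    rcases Nat.eq_zero_or_pos k with hk | hk
    · subst hk; simp [findLoopA]
    · have h2 : ((i + 1 : Nat) : Int) ≤ max cur ((i : Int) + cr) := by
        push_cast; omega
      rw [ih (i + 1) _ _ h2]
      simp [Nat.pos_iff_ne_zero.mp hk]
      omega

lemma findLoopA_le_zero (cr : Int) (hcr : cr ≤ 0) (n : Nat) (hn : 0 < n) :
    findLoopA cr (List.range n) 0 0 = 1 := by
  rw [List.range_eq_range']
  cases n with
  | zero => omega
  | succ m =>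
    rw [List.range'_succ]
    simp only [findLoopA]
    rw [if_pos (by norm_num)]
    cases m with
    | zero => simp [findLoopA]
    | succ m' =>
      rw [List.range'_succ]
      simp only [findLoopA]
      rw [if_neg (by push_cast; omega)]
      norm_num

-- ===== VERDICT (by name: the statement is the Claim_ definition above) =====
theorem find_max_locations_spec : Claim_equal_find_max_locations := by
  intro locations compass_range _
  unfold Spec_find_max_locations find_max_locations find_max_locations_alt
  rcases Nat.eq_zero_or_pos locations.length with h | h
  · simp [h, findLoopA]
  · rw [if_neg (by omega)]
    by_cases hc : 1 ≤ compass_range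
    · rw [if_pos hc, List.range_eq_range',
        findLoopA_ge_one compass_range hc locations.length 0 0 0 (by norm_num)]
      simp [Nat.pos_iff_ne_zero.mp h]
    · rw [if_neg hc, findLoopA_le_zero compass_range (by omega) _ h]
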